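-- pv_equiv track=rewrite | github.com/MasterYI1234/CS521 | Assignment4/HW4_6.29.py | sumOfDoubleEvenPlace
-- ===== SOURCE A (Python) =====
-- def sumOfDoubleEvenPlace(number):
--     sum = 0
--     even = 0
--     #Just from a single to even, if even is 1, then it is even.
--     while number > 0:
--         if even == 1:
--             sum += getDigit(number % 10)
--         even ^= 1
--         number //= 10
--     return sum
--
-- def getDigit(number):
--     #if the number * 2 >=10, then  % 10 + /10(how many ten), return the sum, if number * 2<10, then / 10 is 0.
--     number *= 2
--     return (number % 10) + (number // 10);
-- ===== SOURCE B (Python) =====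
-- def sumOfDoubleEvenPlace(number):
--     # String view of the number: the "even places" are the odd indices of the
--     # reversed decimal string; the doubled digit's digit-sum is int(c)*2 - 9
--     # when the digit char is at least '5', else int(c)*2.
--     if number <= 0:
--         return 0
--     return sum(int(c) * 2 - 9 if c >= '5' else int(c) * 2
--                for i, c in enumerate(reversed(str(number))) if i % 2 == 1)
-- ===== Notes on version B (the rewrite author's own statement) =====
-- stated objective: idiomatic
-- what changed: Replaces A's arithmetic divmod loop with parity flag and getDigit helper by a string pipeline: convert the number to its decimal string, enumerate the reversed string, keep the odd indices (the even places), and sum each doubled digit's digit-sum in closed form decided by a character comparison (c >= '5').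
import Mathlib
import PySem

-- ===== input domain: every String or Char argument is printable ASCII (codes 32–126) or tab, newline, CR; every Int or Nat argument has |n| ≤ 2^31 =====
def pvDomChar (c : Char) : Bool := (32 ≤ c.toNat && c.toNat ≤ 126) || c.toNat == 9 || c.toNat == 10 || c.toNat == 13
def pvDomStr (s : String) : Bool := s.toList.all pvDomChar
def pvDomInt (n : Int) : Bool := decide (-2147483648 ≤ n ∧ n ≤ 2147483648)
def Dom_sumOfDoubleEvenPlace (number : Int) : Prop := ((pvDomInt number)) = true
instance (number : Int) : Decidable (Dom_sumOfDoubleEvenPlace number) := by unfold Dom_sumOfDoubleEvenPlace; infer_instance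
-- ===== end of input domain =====

-- B replaces A's divmod loop (parity flag + getDigit helper) by a string pipeline:
-- enumerate the reversed decimal string, keep the odd indices, and sum each doubled
-- digit's digit-sum via a character comparison (idiomatic).


-- ===== PORT A =====
def getDigit (number : Int) : Int :=
  -- number *= 2; return (number % 10) + (number // 10)
  let number := number * 2
  PySem.Int.mod number 10 + PySem.Int.floordiv number 10

def sumOfDoubleEvenPlaceLoop (number sum even : Int) : Int :=
  if number > 0 then
    let sum := if even == 1 then sum + getDigit (PySem.Int.mod number 10) else sum
    let even := PySem.Int.bxor even 1
    sumOfDoubleEvenPlaceLoop (PySem.Int.floordiv number 10) sum even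
  else sum
termination_by number.toNat
decreasing_by
  rw [PySem.Int.floordiv_eq_ediv_of_pos (by norm_num)]
  omega

def sumOfDoubleEvenPlace (number : Int) : Int :=
  sumOfDoubleEvenPlaceLoop number 0 0

-- ===== PORT B =====
def sumOfDoubleEvenPlace_alt (number : Int) : Int :=
  if number ≤ 0 then 0
  else
    (((PySem.List.enumerate (PySem.Int.toChars number).reverse 0).filter
        (fun p => PySem.Int.mod p.1 2 == 1)).map
      (fun p =>
        -- int(c): every char of str(number) for number > 0 is a decimal digit,
        -- where PySem.Int.ofChars? is exact (returns some)
        let v := (PySem.Int.ofChars? [p.2]).getD 0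
        if '5' ≤ p.2 then v * 2 - 9 else v * 2)).sum

-- ===== PRECONDITION & SPEC =====
def Spec_sumOfDoubleEvenPlace (number : Int) (out : Int) : Prop := out = sumOfDoubleEvenPlace_alt number
instance (number : Int) (out : Int) : Decidable (Spec_sumOfDoubleEvenPlace number out) := by unfold Spec_sumOfDoubleEvenPlace; infer_instance

-- ===== CLAIM =====
def Claim_equal_sumOfDoubleEvenPlace : Prop := ∀ (number : Int), Dom_sumOfDoubleEvenPlace number → Spec_sumOfDoubleEvenPlace number (sumOfDoubleEvenPlace number)

-- ===== LEMMAS AND PROOFS =====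

-- the closed-form contribution of one even-place digit, and the sum over a
-- little-endian digit list (indices 1, 3, 5, …)
def pvCf (b : Nat) : Int := if 5 ≤ b then (b : Int) * 2 - 9 else (b : Int) * 2

def pvOddSum : List Nat → Int
  | [] => 0
  | [_] => 0
  | _ :: b :: l => pvCf b + pvOddSum l

lemma loopA_stop {n s e : Int} (h : ¬ n > 0) :
    sumOfDoubleEvenPlaceLoop n s e = s := by
  rw [sumOfDoubleEvenPlaceLoop]; simp [h]

lemma loopA_step0 {n s : Int} (h : n > 0) :
    sumOfDoubleEvenPlaceLoop n s 0 = sumOfDoubleEvenPlaceLoop (n / 10) s 1 := by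
  rw [sumOfDoubleEvenPlaceLoop,
      PySem.Int.floordiv_eq_ediv_of_pos (show (0:Int) < 10 by norm_num)]
  simp [h, show PySem.Int.bxor 0 1 = 1 from by decide]

lemma loopA_step1 {n s : Int} (h : n > 0) :
    sumOfDoubleEvenPlaceLoop n s 1
      = sumOfDoubleEvenPlaceLoop (n / 10) (s + getDigit (PySem.Int.mod n 10)) 0 := by
  rw [sumOfDoubleEvenPlaceLoop,
      PySem.Int.floordiv_eq_ediv_of_pos (show (0:Int) < 10 by norm_num)]
  simp [h]

-- getDigit on a single digit equals the closed form
lemma getDigit_closed (d : Int) (h0 : 0 ≤ d) (h9 : d < 10) :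
    getDigit d = pvCf d.toNat := by
  rw [getDigit, pvCf,
      PySem.Int.mod_eq_emod_of_pos (show (0:Int) < 10 by norm_num),
      PySem.Int.floordiv_eq_ediv_of_pos (show (0:Int) < 10 by norm_num)]
  split_ifs with h <;> omega

-- A's loop computes the odd-index sum of the little-endian digit list
lemma loopA_eq : ∀ (k : Nat) (n s : Int), n.toNat ≤ k →
    sumOfDoubleEvenPlaceLoop n s 0 = s + pvOddSum (Nat.digits 10 n.toNat) := by
  intro k
  induction k with
  | zero =>
    intro n s hk
    rw [loopA_stop (by omega)]
    simp [show n.toNat = 0 by omega, pvOddSum]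
  | succ k ih =>
    intro n s hk
    by_cases hn : n > 0
    · rw [loopA_step0 hn]
      by_cases hm : n / 10 > 0
      · rw [loopA_step1 hm, ih (n / 10 / 10) _ (by omega)]
        have e1 : (n / 10).toNat = n.toNat / 10 := by omega
        have e2 : (n / 10 / 10).toNat = n.toNat / 10 / 10 := by omega
        have hd : Nat.digits 10 n.toNat
            = n.toNat % 10 :: (n / 10).toNat % 10 :: Nat.digits 10 (n / 10 / 10).toNat := by
          rw [e1, e2, Nat.digits_def' (by norm_num) (by omega),
              Nat.digits_def' (by norm_num) (by omega)]
        rw [hd, pvOddSum,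
            PySem.Int.mod_eq_emod_of_pos (show (0:Int) < 10 by norm_num),
            getDigit_closed _ (Int.emod_nonneg _ (by norm_num)) (Int.emod_lt_of_pos _ (by norm_num))]
        have : (n / 10 % 10).toNat = (n / 10).toNat % 10 := by omega
        rw [this]; ring
      · rw [loopA_stop hm]
        have hd : Nat.digits 10 n.toNat = [n.toNat] := by
          rw [Nat.digits_def' (by norm_num) (by omega),
              show n.toNat / 10 = 0 by omega, Nat.digits_zero,
              show n.toNat % 10 = n.toNat by omega]
        rw [hd, pvOddSum]; ring
    · rw [loopA_stop hn]
      simp [show n.toNat = 0 by omega, pvOddSum]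

-- Nat.toDigitsCore with enough fuel is the reversed digit list, rendered as chars
lemma toDigitsCore_eq : ∀ (f n : Nat) (ds : List Char), 0 < n → n < f →
    Nat.toDigitsCore 10 f n ds = ((Nat.digits 10 n).map Nat.digitChar).reverse ++ ds := by
  intro f
  induction f with
  | zero => intro n ds h1 h2; omega
  | succ f ih =>
    intro n ds h1 h2
    rw [Nat.toDigitsCore]
    by_cases h : n / 10 = 0
    · simp [h, Nat.digits_def' (show (1:Nat) < 10 by norm_num) h1]
    · rw [if_neg h, ih (n / 10) _ (by omega) (by omega),
          Nat.digits_def' (show (1:Nat) < 10 by norm_num) h1]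
      simp

-- str(n) reversed, for n > 0, is the little-endian digit list rendered as chars
lemma toChars_reverse (n : Int) (h : 0 < n) :
    (PySem.Int.toChars n).reverse = (Nat.digits 10 n.toNat).map Nat.digitChar := by
  rw [PySem.Int.toChars]
  rw [if_neg (by omega), Nat.toDigits,
      toDigitsCore_eq (n.toNat + 1) n.toNat [] (by omega) (by omega)]
  simp

-- per-character value of B's summand on a decimal digit char
lemma digit_summand (b : Nat) (hb : b < 10) :
    (let v := (PySem.Int.ofChars? [Nat.digitChar b]).getD 0
     if '5' ≤ Nat.digitChar b then v * 2 - 9 else v * 2) = pvCf b := by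
  interval_cases b <;> decide

-- parity bookkeeping for the enumerate indices
lemma mod2_succ_of_even {s : Int} (h : PySem.Int.mod s 2 = 0) :
    PySem.Int.mod (s + 1) 2 = 1 := by
  rw [PySem.Int.mod_eq_emod_of_pos (by norm_num)] at *
  omega

lemma mod2_succ2_of_even {s : Int} (h : PySem.Int.mod s 2 = 0) :
    PySem.Int.mod (s + 1 + 1) 2 = 0 := by
  rw [PySem.Int.mod_eq_emod_of_pos (by norm_num)] at *
  omega

-- B's filtered-enumerate sum over a digit list equals the odd-index sum
lemma altSum_eq : ∀ (dl : List Nat) (s : Int), PySem.Int.mod s 2 = 0 →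
    (∀ x ∈ dl, x < 10) →
    (((PySem.List.enumerate (dl.map Nat.digitChar) s).filter
        (fun p => PySem.Int.mod p.1 2 == 1)).map
      (fun p =>
        let v := (PySem.Int.ofChars? [p.2]).getD 0
        if '5' ≤ p.2 then v * 2 - 9 else v * 2)).sum = pvOddSum dl := by
  intro dl
  induction dl using pvOddSum.induct with
  | case1 => intro s _ _; simp [PySem.List.enumerate_nil, pvOddSum]
  | case2 a =>
    intro s hs _
    rw [List.map_cons, List.map_nil, PySem.List.enumerate_cons, PySem.List.enumerate_nil,
        List.filter_cons_of_neg (by simp only [hs]; decide)]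
    simp [pvOddSum]
  | case3 a b l ih =>
    intro s hs hlt
    rw [List.map_cons, List.map_cons, PySem.List.enumerate_cons, PySem.List.enumerate_cons]
    rw [List.filter_cons_of_neg (by simp only [hs]; decide),
        List.filter_cons_of_pos (by simp only [mod2_succ_of_even hs]; decide)]
    rw [List.map_cons, List.sum_cons,
        ih (s + 1 + 1) (mod2_succ2_of_even hs) (fun x hx => hlt x (by simp [hx]))]
    rw [pvOddSum]
    have := digit_summand b (hlt b (by simp))
    simp only [] at this ⊢
    rw [this]

-- ===== VERDICT =====
theorem sumOfDoubleEvenPlace_spec : Claim_equal_sumOfDoubleEvenPlace := by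
  intro number _
  unfold Spec_sumOfDoubleEvenPlace sumOfDoubleEvenPlace sumOfDoubleEvenPlace_alt
  by_cases h : number ≤ 0
  · rw [if_pos h, loopA_stop (by omega)]
  · rw [if_neg h, loopA_eq number.toNat number 0 (le_refl _),
        toChars_reverse number (by omega),
        altSum_eq (Nat.digits 10 number.toNat) 0 (by decide)
          (fun x hx => Nat.digits_lt_base (by norm_num) hx)]
    ring
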